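-- pv_equiv track=rewrite | github.com/JakubBraz/adventOfCode2023 | day22.py | to_points
-- ===== SOURCE A (Python) =====
-- def to_points(brick):
--     a, b = brick
--     if a[0] == b[0] and a[1] == b[1]:
--         z_min = min(a[2], b[2])
--         z_max = max(a[2], b[2])
--         return [(a[0], a[1], z) for z in range(z_min, z_max + 1)]
--     if a[0] == b[0] and a[2] == b[2]:
--         y_min = min(a[1], b[1])
--         y_max = max(a[1], b[1])
--         return [(a[0], y, a[2]) for y in range(y_min, y_max + 1)]
--     if a[1] == b[1] and a[2] == b[2]:
--         x_min = min(a[0], b[0])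
--         x_max = max(a[0], b[0])
--         return [(x, a[1], b[2]) for x in range(x_min, x_max + 1)]
--     raise Exception('unreachable')
-- ===== SOURCE B (Python) =====
-- def to_points(brick):
--     a, b = brick
--     if sum(1 for i in range(3) if a[i] != b[i]) > 1:
--         raise Exception('unreachable')
--     los = [min(a[i], b[i]) for i in range(3)]
--     his = [max(a[i], b[i]) for i in range(3)]
--     return [(x, y, z)
--             for x in range(los[0], his[0] + 1)
--             for y in range(los[1], his[1] + 1)
--             for z in range(los[2], his[2] + 1)]
-- ===== Notes on version B (the rewrite author's own statement) =====
-- stated objective: simpler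
-- what changed: Replaces A's three axis-specific branches (each with its own min/max and comprehension) by one uniform bounding-box triple product over per-axis [min,max] ranges, after a single guard counting differing axes; Pre_ excludes bricks differing in two or more axes, where both raise Exception('unreachable').
import Mathlib
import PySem

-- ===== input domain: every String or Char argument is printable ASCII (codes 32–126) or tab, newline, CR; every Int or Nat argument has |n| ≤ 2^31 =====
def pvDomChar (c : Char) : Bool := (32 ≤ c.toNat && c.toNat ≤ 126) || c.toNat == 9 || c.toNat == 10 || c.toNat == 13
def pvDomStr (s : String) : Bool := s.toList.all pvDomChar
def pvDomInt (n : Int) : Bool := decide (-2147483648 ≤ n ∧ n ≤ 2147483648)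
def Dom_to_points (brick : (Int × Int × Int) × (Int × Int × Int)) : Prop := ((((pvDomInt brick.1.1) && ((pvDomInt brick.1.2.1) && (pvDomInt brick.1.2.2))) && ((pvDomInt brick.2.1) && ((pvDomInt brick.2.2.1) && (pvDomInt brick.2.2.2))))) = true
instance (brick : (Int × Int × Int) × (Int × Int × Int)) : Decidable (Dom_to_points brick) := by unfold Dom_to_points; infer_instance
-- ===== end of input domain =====

-- B replaces A's three axis-specific branches by one guard plus a uniform bounding-box
-- triple product over per-axis [min,max] ranges (objective: simpler, same cost).

-- ===== PORT A =====
def to_points (brick : (Int × Int × Int) × (Int × Int × Int)) : List (Int × Int × Int) :=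
  let a := brick.1
  let b := brick.2
  if a.1 = b.1 ∧ a.2.1 = b.2.1 then
    (PySem.List.pyRange (min a.2.2 b.2.2) (max a.2.2 b.2.2 + 1) 1).map (fun z => (a.1, a.2.1, z))
  else if a.1 = b.1 ∧ a.2.2 = b.2.2 then
    (PySem.List.pyRange (min a.2.1 b.2.1) (max a.2.1 b.2.1 + 1) 1).map (fun y => (a.1, y, a.2.2))
  else if a.2.1 = b.2.1 ∧ a.2.2 = b.2.2 then
    (PySem.List.pyRange (min a.1 b.1) (max a.1 b.1 + 1) 1).map (fun x => (x, a.2.1, b.2.2))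
  else []  -- raise Exception('unreachable'): excluded by Pre_to_points

-- ===== PORT B =====
def to_points_alt (brick : (Int × Int × Int) × (Int × Int × Int)) : List (Int × Int × Int) :=
  let a := brick.1
  let b := brick.2
  -- sum(1 for i in range(3) if a[i] != b[i]) > 1 → raise (excluded by Pre_to_points)
  if ((if a.1 ≠ b.1 then (1 : Int) else 0) + (if a.2.1 ≠ b.2.1 then 1 else 0)
      + (if a.2.2 ≠ b.2.2 then 1 else 0)) > 1 then
    []
  else
    let lo0 := min a.1 b.1;   let hi0 := max a.1 b.1
    let lo1 := min a.2.1 b.2.1; let hi1 := max a.2.1 b.2.1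
    let lo2 := min a.2.2 b.2.2; let hi2 := max a.2.2 b.2.2
    (PySem.List.pyRange lo0 (hi0 + 1) 1).flatMap fun x =>
      (PySem.List.pyRange lo1 (hi1 + 1) 1).flatMap fun y =>
        (PySem.List.pyRange lo2 (hi2 + 1) 1).map fun z => (x, y, z)

-- ===== PRECONDITION & SPEC =====
-- Pre_ excludes bricks whose endpoints differ in two or more coordinates: there both
-- A and B raise Exception('unreachable').
def Pre_to_points (brick : (Int × Int × Int) × (Int × Int × Int)) : Prop :=
  (brick.1.1 = brick.2.1 ∧ brick.1.2.1 = brick.2.2.1) ∨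
  (brick.1.1 = brick.2.1 ∧ brick.1.2.2 = brick.2.2.2) ∨
  (brick.1.2.1 = brick.2.2.1 ∧ brick.1.2.2 = brick.2.2.2)
instance (brick : (Int × Int × Int) × (Int × Int × Int)) : Decidable (Pre_to_points brick) := by unfold Pre_to_points; infer_instance

def pvWitness_to_points : ((Int × Int × Int) × (Int × Int × Int)) := ((1, 2, 3), (1, 2, 5))

def Spec_to_points (brick : (Int × Int × Int) × (Int × Int × Int)) (out : List (Int × Int × Int)) : Prop := out = to_points_alt brick
instance (brick : (Int × Int × Int) × (Int × Int × Int)) (out : List (Int × Int × Int)) : Decidable (Spec_to_points brick out) := by unfold Spec_to_points; infer_instance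

-- ===== CLAIM (what is proved, stated in full; the proofs are below) =====
def Claim_equal_to_points : Prop := ∀ (brick : (Int × Int × Int) × (Int × Int × Int)), Dom_to_points brick → Pre_to_points brick → Spec_to_points brick (to_points brick)

-- ===== LEMMAS AND PROOFS =====

-- ===== VERDICT (by name: the statement is the Claim_ definition above) =====
theorem to_points_spec : Claim_equal_to_points := by
  rintro ⟨⟨a0, a1, a2⟩, ⟨b0, b1, b2⟩⟩ _ hpre
  unfold Pre_to_points at hpre
  dsimp only at hpre
  unfold Spec_to_points to_points to_points_alt
  by_cases h01 : a0 = b0 ∧ a1 = b1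
  · obtain ⟨rfl, rfl⟩ := h01
    by_cases h2 : a2 = b2
    · subst h2; simp [PySem.List.pyRange_one_singleton]
    · simp [h2, PySem.List.pyRange_one_singleton]
  · by_cases h02 : a0 = b0 ∧ a2 = b2
    · obtain ⟨rfl, rfl⟩ := h02
      have h1 : a1 ≠ b1 := fun h => h01 ⟨rfl, h⟩
      simp [h1, PySem.List.pyRange_one_singleton, List.map_eq_flatMap]
    · rcases hpre with h | h | h
      · exact absurd h h01
      · exact absurd h h02
      · obtain ⟨rfl, rfl⟩ := h
        have h0 : a0 ≠ b0 := fun h => h01 ⟨h, rfl⟩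
        simp [h0, PySem.List.pyRange_one_singleton, List.map_eq_flatMap]
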